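-- pv_equiv track=rewrite | github.com/eneserkoc/hackerrank-challenges | problem_solving/repeated_string.py | repeatedString
-- ===== SOURCE A (Python) =====
-- def repeatedString(s, n):
--
--     length = len(s)
--     num_a = 0
--
--     # 'a' number in string
--     for i in range(0, length):
--         if(s[i] == "a"):
--             num_a += 1
--     #length is always greater than 1, so need for checking 0
--     #number of "s" string in substring
--
--     total_num_a = (n // length) * num_a
--
--     #incompleted string size
--     left_string = n % length
--
--     #number of "a" in incompleted string
--     for i in range(0, left_string):
--         if(s[i] == "a"):
--             total_num_a += 1
--
--     return total_num_a
-- ===== SOURCE B (Python) =====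
-- def repeatedString(s, n):
--     # Build a prefix table: pref[i] = number of 'a' in s[:i], then answer by lookups.
--     pref = [0]
--     for ch in s:
--         pref.append(pref[-1] + (1 if ch == "a" else 0))
--     L = len(s)
--     return pref[L] * (n // L) + pref[n % L]
-- ===== Notes on version B (the rewrite author's own statement) =====
-- stated objective: alternative
-- what changed: B builds a cumulative prefix-count table of 'a' in one scan and answers by two O(1) table lookups, instead of A's two separate counting loops (full string and remainder prefix).
import Mathlib
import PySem

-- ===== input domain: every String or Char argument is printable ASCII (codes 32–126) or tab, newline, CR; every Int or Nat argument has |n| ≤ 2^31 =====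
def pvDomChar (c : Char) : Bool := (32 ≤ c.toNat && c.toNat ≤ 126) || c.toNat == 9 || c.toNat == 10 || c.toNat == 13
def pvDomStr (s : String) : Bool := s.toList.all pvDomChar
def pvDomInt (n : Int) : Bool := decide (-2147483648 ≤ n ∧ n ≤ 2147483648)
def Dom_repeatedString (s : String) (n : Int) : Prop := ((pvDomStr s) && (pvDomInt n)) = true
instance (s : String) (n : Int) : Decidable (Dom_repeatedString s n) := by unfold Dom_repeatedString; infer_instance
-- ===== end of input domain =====

-- B replaces A's two counting loops by one prefix-count table and two lookups (alternative decomposition, same cost).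

-- ===== PORT A =====
-- s[i] with 0 ≤ i < len(s): PySem.List.pyGetD on s.toList is exact there (never hits the default).
def repeatedString (s : String) (n : Int) : Int :=
  let length : Int := PySem.Str.len s
  let num_a : Int := (PySem.List.pyRange 0 length 1).foldl
    (fun acc i => if PySem.List.pyGetD s.toList i ' ' = 'a' then acc + 1 else acc) 0
  let total_num_a : Int := (PySem.Int.floordiv n length) * num_a
  let left_string : Int := PySem.Int.mod n length
  (PySem.List.pyRange 0 left_string 1).foldl
    (fun acc i => if PySem.List.pyGetD s.toList i ' ' = 'a' then acc + 1 else acc) total_num_a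

-- ===== PORT B =====
-- pref[-1] is Python negative indexing; pref is always nonempty and the other indices in range, so pyGetD is exact.
def repeatedString_alt (s : String) (n : Int) : Int :=
  let pref : List Int := s.toList.foldl
    (fun p c => p ++ [PySem.List.pyGetD p (-1) 0 + (if c = 'a' then 1 else 0)]) [0]
  let L : Int := PySem.Str.len s
  PySem.List.pyGetD pref L 0 * (PySem.Int.floordiv n L) + PySem.List.pyGetD pref (PySem.Int.mod n L) 0

-- ===== PRECONDITION & SPEC =====
-- Pre_ excludes exactly s = "", on which A raises ZeroDivisionError (n // 0); B raises there too.
def Pre_repeatedString (s : String) (n : Int) : Prop := s ≠ ""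
instance (s : String) (n : Int) : Decidable (Pre_repeatedString s n) := by unfold Pre_repeatedString; infer_instance
def pvWitness_repeatedString : String × Int := ("aba", 10)
def Spec_repeatedString (s : String) (n : Int) (out : Int) : Prop := out = repeatedString_alt s n
instance (s : String) (n : Int) (out : Int) : Decidable (Spec_repeatedString s n out) := by unfold Spec_repeatedString; infer_instance

-- ===== CLAIM (what is proved, stated in full; the proofs are below) =====
def Claim_equal_repeatedString : Prop := ∀ (s : String) (n : Int), Dom_repeatedString s n → Pre_repeatedString s n → Spec_repeatedString s n (repeatedString s n)

-- ===== LEMMAS AND PROOFS =====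

-- One step of B's table-building fold.
theorem step_lemma (ys : List Char) (c : Char) (f : Nat → Int)
  (hf : ∀ k, f k = ((ys.take k).count 'a' : Int)) :
    (List.range (ys.length + 1)).map f ++
      [PySem.List.pyGetD ((List.range (ys.length + 1)).map f) (-1) 0 + (if c = 'a' then 1 else 0)]
    = (List.range ((ys ++ [c]).length + 1)).map (fun k => (((ys ++ [c]).take k).count 'a' : Int)) := by
  have hne : (List.range (ys.length + 1)).map f ≠ [] := by simp
  rw [PySem.List.pyGetD_neg_one _ _ hne]
  simp [List.getLast_eq_getElem, List.length_append, List.range_succ (n := ys.length + 1)]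
  refine ⟨fun k hk => ?_, ?_⟩
  · rw [hf, List.take_append_of_le_length (by omega)]
  · rw [hf]
    rw [List.take_of_length_le (l := ys ++ [c]) (by simp)]
    split_ifs <;> simp_all [List.count_append]

-- B's table is the map of prefix counts of 'a'.
theorem pref_eq (xs : List Char) :
    xs.foldl (fun p c => p ++ [PySem.List.pyGetD p (-1) 0 + (if c = 'a' then 1 else 0)]) [0]
      = (List.range (xs.length + 1)).map (fun k => ((xs.take k).count 'a' : Int)) := by
  induction xs using List.reverseRecOn with
  | nil => simp
  | append_singleton ys c ih =>
      rw [List.foldl_append, List.foldl_cons, List.foldl_nil, ih]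
      exact step_lemma ys c _ (fun k => rfl)

-- A's counting loop over the first m characters is the count on the prefix.
theorem countFold (xs : List Char) (m : Int) (init : Int) (h0 : 0 ≤ m) (h : m ≤ (xs.length : Int)) :
    (PySem.List.pyRange 0 m 1).foldl
      (fun acc i => if PySem.List.pyGetD xs i ' ' = 'a' then acc + 1 else acc) init
      = init + ((xs.take m.toNat).count 'a' : Int) := by
  have hlen : ((xs.take m.toNat).length : Int) = m := by
    simp [List.length_take]; omega
  rw [PySem.List.foldl_congr_mem (g := fun acc i =>
        if PySem.List.pyGetD (xs.take m.toNat) i ' ' = 'a' then acc + 1 else acc)]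
  · have := PySem.List.foldl_pyRange_zero_pyGetD' (xs.take m.toNat) ' '
        (fun acc c => if c = 'a' then acc + 1 else acc) init
    rw [hlen] at this
    rw [this, PySem.List.foldl_ite_add_one]
    simp only [List.count]
    congr 1
  · intro acc i hi
    rw [PySem.List.mem_pyRange_one] at hi
    rw [PySem.List.pyGetD_eq_getElem xs ' ' hi.1 (lt_of_lt_of_le hi.2 h),
        PySem.List.pyGetD_eq_getElem (xs.take m.toNat) ' ' hi.1 (by rw [hlen]; exact hi.2)]
    rw [List.getElem_take]

-- A lookup in B's table is a prefix count.
theorem pref_get (xs : List Char) (i : Int) (h0 : 0 ≤ i) (h : i ≤ (xs.length : Int)) :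
    PySem.List.pyGetD ((List.range (xs.length + 1)).map (fun k => ((xs.take k).count 'a' : Int))) i 0
      = ((xs.take i.toNat).count 'a' : Int) := by
  rw [PySem.List.pyGetD_eq_getElem _ _ h0 (by simp; omega)]
  simp

-- ===== VERDICT (by name: the statement is the Claim_ definition above) =====
theorem repeatedString_spec : Claim_equal_repeatedString := by
  intro s n _ hpre
  have hne : s.toList ≠ [] := by
    intro h
    exact hpre (by rwa [← String.toList_eq_nil_iff])
  have hlen : 0 < (s.toList.length : Int) := by
    have := List.length_pos_iff.mpr hne; exact_mod_cast this
  unfold Spec_repeatedString repeatedString repeatedString_alt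
  simp only [PySem.Str.len_eq]
  rw [pref_eq]
  have hmod0 : 0 ≤ PySem.Int.mod n (s.toList.length : Int) := PySem.Int.mod_nonneg _ hlen
  have hmodlt : PySem.Int.mod n (s.toList.length : Int) < (s.toList.length : Int) :=
    PySem.Int.mod_lt _ hlen
  rw [countFold _ _ _ (by omega) (le_refl _),
      countFold _ _ _ hmod0 (le_of_lt hmodlt),
      pref_get _ _ (by omega) (le_refl _),
      pref_get _ _ hmod0 (le_of_lt hmodlt)]
  simp [List.take_of_length_le]
  ring
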